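-- pv_equiv track=rewrite | github.com/paiml/depyler | examples/hard_compute_stats.py | stat_variance_x100
-- ===== SOURCE A (Python) =====
-- def stat_sum(arr: list[int]) -> int:
--     """Sum of all elements."""
--     total: int = 0
--     i: int = 0
--     n: int = len(arr)
--     while i < n:
--         total = total + arr[i]
--         i = i + 1
--     return total
--
-- def stat_mean_x100(arr: list[int]) -> int:
--     """Mean * 100 (integer approximation)."""
--     n: int = len(arr)
--     if n == 0:
--         return 0
--     total: int = stat_sum(arr)
--     return total * 100 // n
--
-- def stat_variance_x100(arr: list[int]) -> int:
--     """Population variance * 100 (integer approximation)."""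
--     n: int = len(arr)
--     if n == 0:
--         return 0
--     mean_x100: int = stat_mean_x100(arr)
--     sum_sq: int = 0
--     i: int = 0
--     while i < n:
--         diff: int = arr[i] * 100 - mean_x100
--         sum_sq = sum_sq + diff * diff
--         i = i + 1
--     return sum_sq // (n * 100)
-- ===== SOURCE B (Python) =====
-- def stat_variance_x100(arr: list[int]) -> int:
--     """Population variance * 100 (integer approximation).
--
--     One pass over the data accumulating sum and sum of squares, then an
--     exact algebraic expansion of sum((a*100 - mean_x100)**2)."""
--     n = len(arr)
--     if n == 0:
--         return 0
--     s = 0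
--     s2 = 0
--     for a in arr:
--         s += a
--         s2 += a * a
--     mean_x100 = s * 100 // n
--     return (10000 * s2 - 200 * mean_x100 * s + n * mean_x100 * mean_x100) // (n * 100)
-- ===== Notes on version B (the rewrite author's own statement) =====
-- stated objective: faster
-- what changed: Replaces the two-pass mean-then-squared-deviations computation (three loops across helper functions) with a single pass accumulating sum and sum-of-squares, and an exact algebraic expansion of the squared-deviation sum.
import Mathlib
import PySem

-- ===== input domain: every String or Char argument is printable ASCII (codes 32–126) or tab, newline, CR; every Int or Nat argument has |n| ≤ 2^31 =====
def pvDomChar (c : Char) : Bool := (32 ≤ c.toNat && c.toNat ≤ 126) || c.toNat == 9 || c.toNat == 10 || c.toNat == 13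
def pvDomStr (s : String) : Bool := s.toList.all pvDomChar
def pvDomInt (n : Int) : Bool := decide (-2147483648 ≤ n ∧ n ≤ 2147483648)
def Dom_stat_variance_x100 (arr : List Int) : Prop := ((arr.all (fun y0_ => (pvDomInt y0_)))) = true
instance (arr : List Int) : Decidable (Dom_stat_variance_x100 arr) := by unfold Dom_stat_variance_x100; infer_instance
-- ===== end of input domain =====

-- B: one-pass sum/sum-of-squares accumulation with an exact algebraic expansion, replacing A's mean-then-deviations loops (same O(n), timing run measured a constant-factor speedup).
-- ===== PORT A =====
def stat_sum (arr : List Int) : Int :=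
  (PySem.List.pyRange 0 (PySem.List.len arr)).foldl
    (fun total i => total + PySem.List.pyGetD arr i 0) 0

def stat_mean_x100 (arr : List Int) : Int :=
  let n : Int := PySem.List.len arr
  if n == 0 then 0
  else PySem.Int.floordiv (stat_sum arr * 100) n

def stat_variance_x100 (arr : List Int) : Int :=
  let n : Int := PySem.List.len arr
  if n == 0 then 0
  else
    let mean_x100 : Int := stat_mean_x100 arr
    let sum_sq : Int :=
      (PySem.List.pyRange 0 n).foldl
        (fun s i =>
          let diff : Int := PySem.List.pyGetD arr i 0 * 100 - mean_x100
          s + diff * diff) 0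
    PySem.Int.floordiv sum_sq (n * 100)

-- ===== PORT B =====
def stat_variance_x100_alt (arr : List Int) : Int :=
  let n : Int := arr.length
  if n == 0 then 0
  else
    let p : Int × Int := arr.foldl (fun s a => (s.1 + a, s.2 + a * a)) (0, 0)
    let mean_x100 : Int := PySem.Int.floordiv (p.1 * 100) n
    PySem.Int.floordiv (10000 * p.2 - 200 * mean_x100 * p.1 + n * mean_x100 * mean_x100) (n * 100)

-- ===== PRECONDITION & SPEC =====
def Spec_stat_variance_x100 (arr : List Int) (out : Int) : Prop := out = stat_variance_x100_alt arr
instance (arr : List Int) (out : Int) : Decidable (Spec_stat_variance_x100 arr out) := by unfold Spec_stat_variance_x100; infer_instance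

-- ===== CLAIM (what is proved, stated in full; the proofs are below) =====
def Claim_equal_stat_variance_x100 : Prop := ∀ (arr : List Int), Dom_stat_variance_x100 arr → Spec_stat_variance_x100 arr (stat_variance_x100 arr)

-- ===== LEMMAS AND PROOFS =====

lemma pv_expand (m : Int) (arr : List Int) :
    (arr.map (fun a => (a * 100 - m) * (a * 100 - m))).sum =
      10000 * (arr.map (fun a => a * a)).sum
        - 200 * m * (arr.map (fun a => a)).sum
        + (arr.length : Int) * (m * m) := by
  induction arr with
  | nil => simp
  | cons a l ih =>
    simp only [List.map_cons, List.sum_cons, List.length_cons]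
    push_cast
    rw [ih]; ring

lemma pv_sum_fold (xs : List Int) :
    List.foldl (fun total i => total + PySem.List.pyGetD xs i 0) 0
      (PySem.List.pyRange 0 (xs.length : Int)) = (xs.map (fun x => x)).sum := by
  have h : ((xs.length : Int)) = PySem.List.len xs := by simp [PySem.List.len]
  rw [h, PySem.List.foldl_pyRange_pyGetD xs 0 (fun t x => t + x) 0 le_rfl]
  simp only [Int.toNat_zero, List.drop_zero]
  rw [PySem.List.foldl_add xs (fun x => x) 0]
  simp

lemma pv_sq_fold (xs : List Int) (m : Int) :
    List.foldl (fun s i =>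
        s + (PySem.List.pyGetD xs i 0 * 100 - m) * (PySem.List.pyGetD xs i 0 * 100 - m)) 0
      (PySem.List.pyRange 0 (xs.length : Int)) =
      (xs.map (fun x => (x * 100 - m) * (x * 100 - m))).sum := by
  have h : ((xs.length : Int)) = PySem.List.len xs := by simp [PySem.List.len]
  rw [h, PySem.List.foldl_pyRange_pyGetD xs 0
        (fun s x => s + (x * 100 - m) * (x * 100 - m)) 0 le_rfl]
  simp only [Int.toNat_zero, List.drop_zero]
  rw [PySem.List.foldl_add xs (fun x => (x * 100 - m) * (x * 100 - m)) 0]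
  simp

lemma pv_ports_eq (arr : List Int) :
    stat_variance_x100 arr = stat_variance_x100_alt arr := by
  cases arr with
  | nil => rfl
  | cons a l =>
    unfold stat_variance_x100 stat_variance_x100_alt stat_mean_x100 stat_sum
    have hlen : PySem.List.len (a :: l) = ((a :: l).length : Int) := by
      simp [PySem.List.len]
    have hne : (((a :: l).length : Int) == 0) = false := by
      simp; omega
    rw [hlen]
    simp only [hne, Bool.false_eq_true, if_false]
    rw [pv_sum_fold, pv_sq_fold]
    rw [PySem.List.foldl_prod_mk (fun s e => s + e) (fun s e => s + e * e) (a :: l) 0 0]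
    rw [PySem.List.foldl_add (a :: l) (fun x => x) 0,
        PySem.List.foldl_add (a :: l) (fun x => x * x) 0]
    simp only [zero_add]
    rw [pv_expand]
    ring_nf

-- ===== VERDICT (by name: the statement is the Claim_ definition above) =====
theorem stat_variance_x100_spec : Claim_equal_stat_variance_x100 := by
  intro arr _
  unfold Spec_stat_variance_x100
  exact pv_ports_eq arr
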